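-- pv_equiv track=rewrite | github.com/NakulK48/aoc-2023 | problem_13.py | get_mirror_index_b
-- ===== SOURCE A (Python) =====
-- from typing import Any
--
-- def single_mismatched_index(iter1: list[Any], iter2: list[Any]) -> int | None:
--     mismatches = [i for i, (a, b) in enumerate(zip(iter1, iter2)) if a != b]
--     if len(mismatches) == 1:
--         return mismatches[0]
--     return None
--
-- def get_mirror_index_b(iterable: list[str]) -> int | None:
--     for mirror_idx in range(1, len(iterable)):
--         distance = min(mirror_idx, len(iterable) - mirror_idx)
--         to_left = iterable[(mirror_idx - distance):mirror_idx][::-1]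
--         to_right = iterable[mirror_idx:mirror_idx + distance]
--         mismatched_iterable_index = single_mismatched_index(to_left, to_right)
--         if mismatched_iterable_index is None:
--             continue
--         mismatched_cell_index = single_mismatched_index(
--             to_left[mismatched_iterable_index], to_right[mismatched_iterable_index]
--         )
--         if mismatched_cell_index is not None:
--             return mirror_idx
--
--     return None
-- ===== SOURCE B (Python) =====
-- def _smudge_cost(r1, r2):
--     # 0 = identical rows, 1 = exactly one differing cell, 2 = irreparable
--     if r1 == r2:
--         return 0
--     d = sum(a != b for a, b in zip(r1, r2))
--     return 1 if d == 1 else 2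
--
-- def get_mirror_index_b(iterable):
--     # Classic smudge formulation: the mirror line is the split whose total
--     # repair cost, summed outward over reflected pairs, is exactly 1.
--     n = len(iterable)
--     for m in range(1, n):
--         total = 0
--         i, j = m - 1, m
--         while i >= 0 and j < n:
--             total += _smudge_cost(iterable[i], iterable[j])
--             if total > 1:
--                 break
--             i -= 1
--             j += 1
--         if total == 1:
--             return m
--     return None
-- ===== Notes on version B (the rewrite author's own statement) =====
-- stated objective: alternative
-- what changed: B replaces A's two-stage check (build the list of mismatched reflected row pairs, then re-scan the unique pair for a single differing cell) with the classic total-smudge-cost formulation: two pointers walk outward from each split summing a per-pair repair cost (0 identical / 1 one cell differs / 2 irreparable) and break as soon as the total exceeds 1; the mirror is the split whose total is exactly 1 - no slices, no reverse, no mismatch-index lists.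
import Mathlib
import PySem

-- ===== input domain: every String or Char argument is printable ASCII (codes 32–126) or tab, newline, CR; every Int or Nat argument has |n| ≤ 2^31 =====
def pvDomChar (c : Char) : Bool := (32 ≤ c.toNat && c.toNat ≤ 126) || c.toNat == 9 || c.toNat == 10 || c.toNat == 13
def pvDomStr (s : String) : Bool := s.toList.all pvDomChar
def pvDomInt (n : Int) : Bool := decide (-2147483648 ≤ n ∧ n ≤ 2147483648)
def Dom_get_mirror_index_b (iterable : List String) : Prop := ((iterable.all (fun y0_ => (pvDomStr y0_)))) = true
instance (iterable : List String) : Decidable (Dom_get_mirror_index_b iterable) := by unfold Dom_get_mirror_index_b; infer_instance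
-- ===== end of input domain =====

-- B replaces A's staged check (mismatched-pair index list, then re-scan the unique pair)
-- with the total-smudge-cost formulation: two pointers walk outward from each split summing
-- a per-pair repair cost with early abort; the mirror is the split with total exactly 1
-- (objective: alternative).

-- ===== PORT A =====
-- helper: single_mismatched_index (generic, used on lists of strings and on strings' chars)
def single_mismatched_index {α : Type} [DecidableEq α] (iter1 iter2 : List α) : Option Int :=
  let mismatches := ((PySem.List.enumerate (iter1.zip iter2) 0).filter
      (fun p => p.2.1 != p.2.2)).map (·.1)
  if mismatches.length = 1 then some (PySem.List.pyGetD mismatches 0 0) else none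
  -- mismatches[0] via pyGetD: the index 0 is in range whenever the branch is taken

-- the for-loop over range(1, len(iterable)) with early return
def pvGoA (iterable : List String) (ms : List Int) : Option Int :=
  match ms with
  | [] => none
  | mirror_idx :: rest =>
    let distance := min mirror_idx ((iterable.length : Int) - mirror_idx)
    -- xs[a:b][::-1] : slice then reverse
    let to_left := (PySem.List.slice iterable (some (mirror_idx - distance)) (some mirror_idx)).reverse
    let to_right := PySem.List.slice iterable (some mirror_idx) (some (mirror_idx + distance))
    match single_mismatched_index to_left to_right with
    | none => pvGoA iterable rest
    | some k =>
      -- to_left[k] / to_right[k]: k is a valid index whenever smi returns it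
      let l := PySem.List.pyGetD to_left k ""
      let r := PySem.List.pyGetD to_right k ""
      match single_mismatched_index l.toList r.toList with
      | none => pvGoA iterable rest
      | some _ => some mirror_idx

def get_mirror_index_b (iterable : List String) : Option Int :=
  pvGoA iterable (PySem.List.pyRange 1 (iterable.length : Int) 1)

-- ===== PORT B =====
-- _smudge_cost: 0 = identical rows, 1 = exactly one differing cell, 2 = irreparable
def pvSmudgeCost (r1 r2 : String) : Int :=
  if r1 = r2 then 0
  else
    let d := (r1.toList.zip r2.toList).foldl
        (fun (acc : Int) p => if p.1 ≠ p.2 then acc + 1 else acc) 0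
    if d = 1 then 1 else 2

-- the while-loop: walk i,j outward from the split, summing costs, break once total > 1
def pvWalk (rows : List String) (n i j total : Int) : Int :=
  if h : 0 ≤ i ∧ j < n then
    -- iterable[i] / iterable[j]: in range by the loop condition
    let total' := total + pvSmudgeCost (PySem.List.pyGetD rows i "") (PySem.List.pyGetD rows j "")
    if 1 < total' then total'
    else pvWalk rows n (i - 1) (j + 1) total'
  else total
termination_by (n - j).toNat
decreasing_by omega

def pvGoBAlt (rows : List String) (n : Int) (ms : List Int) : Option Int :=
  match ms with
  | [] => none
  | m :: rest => if pvWalk rows n (m - 1) m 0 = 1 then some m else pvGoBAlt rows n rest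

def get_mirror_index_b_alt (iterable : List String) : Option Int :=
  pvGoBAlt iterable (iterable.length : Int) (PySem.List.pyRange 1 (iterable.length : Int) 1)

-- ===== PRECONDITION & SPEC =====
def Spec_get_mirror_index_b (iterable : List String) (out : Option Int) : Prop := out = get_mirror_index_b_alt iterable
instance (iterable : List String) (out : Option Int) : Decidable (Spec_get_mirror_index_b iterable out) := by unfold Spec_get_mirror_index_b; infer_instance

-- ===== CLAIM (what is proved, stated in full; the proofs are below) =====
def Claim_equal_get_mirror_index_b : Prop := ∀ (iterable : List String), Dom_get_mirror_index_b iterable → Spec_get_mirror_index_b iterable (get_mirror_index_b iterable)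

-- ===== LEMMAS AND PROOFS =====

-- zip as a map over the range of its indices
lemma pv_zip_eq {A : Type} (L R : List A) (d : A) :
    L.zip R = (List.range (L.zip R).length).map (fun k => (L.getD k d, R.getD k d)) := by
  apply List.ext_getElem (by simp)
  intro k h1 h2
  have hk : k < (L.zip R).length := h1
  simp only [List.length_zip] at hk
  simp [List.getElem_zip, List.getD_eq_getElem, Nat.lt_min.mp hk]

-- enumerate as a map over the range of indices
lemma pv_enumerate_eq {B : Type} (d : B) (zs : List B) : ∀ s : Int,
    PySem.List.enumerate zs s = (List.range zs.length).map (fun (k : Nat) => (s + (k : Int), zs.getD k d)) := by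
  induction zs with
  | nil => intro s; simp [PySem.List.enumerate]
  | cons z t ih =>
    intro s
    rw [PySem.List.enumerate_cons, ih (s + 1)]
    rw [List.length_cons, List.range_succ_eq_map, List.map_cons, List.map_map]
    refine congrArg₂ List.cons (by simp) ?_
    refine List.map_congr_left ?_
    intro k hk
    simp [Function.comp, List.getD_cons_succ, Prod.ext_iff]
    push_cast
    ring

-- characterisation of single_mismatched_index via a filtered index range
lemma pv_smi {A : Type} [DecidableEq A] (L R : List A) (d : A) :
    single_mismatched_index L R =
      (if ((List.range (L.zip R).length).filter (fun k => L.getD k d != R.getD k d)).length = 1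
       then some ((((List.range (L.zip R).length).filter (fun k => L.getD k d != R.getD k d)).headD 0 : Nat) : Int)
       else none) := by
  have hb : ∀ k ∈ List.range (L.zip R).length,
      (((L.zip R).getD k (d, d)).1 != ((L.zip R).getD k (d, d)).2) = (L.getD k d != R.getD k d) := by
    intro k hk
    rw [List.mem_range] at hk
    have hL : k < L.length := by rw [List.length_zip] at hk; omega
    have hR : k < R.length := by rw [List.length_zip] at hk; omega
    rw [List.getD_eq_getElem _ _ hk, List.getElem_zip,
        List.getD_eq_getElem _ _ hL, List.getD_eq_getElem _ _ hR]
  unfold single_mismatched_index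
  rw [pv_enumerate_eq (d, d) (L.zip R) 0, List.filter_map, List.map_map]
  rw [List.filter_congr (q := fun k => L.getD k d != R.getD k d) (by
    intro k hk
    simpa using hb k hk)]
  have hm : ((fun (p : Int × (A × A)) => p.1) ∘
      (fun (k : Nat) => ((0 : Int) + (k : Int), (L.zip R).getD k (d, d)))) = fun (k : Nat) => ((k : Int)) := by
    funext k; simp
  rw [hm]
  simp only [List.length_map]
  split_ifs with h
  · obtain ⟨k0, hk0⟩ := List.length_eq_one_iff.mp h
    rw [hk0]
    simp [PySem.List.pyGetD_zero_cons]
  · rfl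

-- count of mismatched zipped elements equals the filtered index range length
lemma pv_char_count {A : Type} [DecidableEq A] (L R : List A) (d : A) :
    (L.zip R).countP (fun p => decide (p.1 ≠ p.2)) =
      ((List.range (L.zip R).length).filter (fun k => L.getD k d != R.getD k d)).length := by
  rw [← List.countP_eq_length_filter]
  conv_lhs => rw [pv_zip_eq L R d]
  rw [List.countP_map]
  refine List.countP_congr ?_
  intro k hk
  rw [List.mem_range] at hk
  have hL : k < L.length := by rw [List.length_zip] at hk; omega
  have hR : k < R.length := by rw [List.length_zip] at hk; omega
  simp [Function.comp, List.getD_eq_getElem _ _ hk, List.getElem_zip,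
    List.getD_eq_getElem _ _ hL, List.getD_eq_getElem _ _ hR, bne_iff_ne]

-- drop-then-take as a map over an index range
lemma pv_drop_take (rows : List String) (e c : Nat) (h : e + c ≤ rows.length) :
    (rows.drop e).take c = (List.range c).map (fun k => rows.getD (e + k) "") := by
  apply List.ext_getElem
  · simp only [List.length_take, List.length_drop, List.length_map, List.length_range]
    omega
  · intro k h1 h2
    have hk : k < c := by simpa using h2
    simp only [List.getElem_take, List.getElem_drop, List.getElem_map, List.getElem_range]
    rw [List.getD_eq_getElem _ _ (show e + k < rows.length by omega)]

-- reversing a map over a range re-indexes it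
lemma pv_rev_map_range {A : Type} (c : Nat) (F : Nat → A) :
    ((List.range c).map F).reverse = (List.range c).map (fun k => F (c - 1 - k)) := by
  apply List.ext_getElem
  · simp
  · intro k h1 h2
    have hk : k < c := by simpa using h2
    rw [List.getElem_reverse]
    simp only [List.getElem_map, List.getElem_range, List.length_map, List.length_range]

lemma pv_to_left (rows : List String) (m : Int) (hm1 : 1 ≤ m) (hm2 : m < (rows.length : Int)) :
    (PySem.List.slice rows (some (m - min m ((rows.length : Int) - m))) (some m)).reverse
      = (List.range (min m ((rows.length : Int) - m)).toNat).map
          (fun k => rows.getD (m.toNat - 1 - k) "") := by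
  rw [PySem.List.slice_toNat rows (by omega) (by omega)]
  have he : m.toNat - (m - min m ((rows.length : Int) - m)).toNat
      = (min m ((rows.length : Int) - m)).toNat := by omega
  rw [he, pv_drop_take rows _ _ (by omega), pv_rev_map_range]
  refine List.map_congr_left ?_
  intro k hk
  rw [List.mem_range] at hk
  congr 1
  omega

lemma pv_to_right (rows : List String) (m : Int) (hm1 : 1 ≤ m) (hm2 : m < (rows.length : Int)) :
    PySem.List.slice rows (some m) (some (m + min m ((rows.length : Int) - m)))
      = (List.range (min m ((rows.length : Int) - m)).toNat).map
          (fun k => rows.getD (m.toNat + k) "") := by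
  rw [PySem.List.slice_toNat rows (by omega) (by omega)]
  have he : (m + min m ((rows.length : Int) - m)).toNat - m.toNat
      = (min m ((rows.length : Int) - m)).toNat := by omega
  rw [he, pv_drop_take rows _ _ (by omega)]

-- the element fetches of both programs at a valid mirror offset agree
lemma pv_fetch (rows : List String) (m : Int) (hm1 : 1 ≤ m) (hm2 : m < (rows.length : Int))
    (k : Nat) (hk : k < (min m ((rows.length : Int) - m)).toNat) :
    PySem.List.pyGetD rows (m - 1 - (k : Int)) "" = rows.getD (m.toNat - 1 - k) ""
    ∧ PySem.List.pyGetD rows (m + (k : Int)) "" = rows.getD (m.toNat + k) "" := by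
  constructor
  · rw [PySem.List.pyGetD_eq_getElem _ _ (by omega) (by omega),
      List.getD_eq_getElem _ _ (show m.toNat - 1 - k < rows.length by omega)]
    exact getElem_congr rfl (by omega) (by omega)
  · rw [PySem.List.pyGetD_eq_getElem _ _ (by omega) (by omega),
      List.getD_eq_getElem _ _ (show m.toNat + k < rows.length by omega)]
    exact getElem_congr rfl (by omega) (by omega)

-- smudge costs are nonnegative; positive on unequal rows
lemma pv_cost_nonneg (r1 r2 : String) : 0 ≤ pvSmudgeCost r1 r2 := by
  simp only [pvSmudgeCost]
  split_ifs <;> norm_num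

lemma pv_cost_one_le (r1 r2 : String) (h : r1 ≠ r2) : 1 ≤ pvSmudgeCost r1 r2 := by
  simp only [pvSmudgeCost, if_neg h]
  split_ifs <;> norm_num

lemma pv_sum_nonneg (l : List Nat) (c : Nat → Int) (h : ∀ k ∈ l, 0 ≤ c k) :
    0 ≤ (l.map c).sum := by
  induction l with
  | nil => simp
  | cons x t ih =>
    have := h x (by simp)
    have := ih (fun k hk => h k (List.mem_cons_of_mem _ hk))
    simp only [List.map_cons, List.sum_cons]
    omega

-- a sum over an index list only sees the indices where the summand is nonzero
lemma pv_sum_filter (l : List Nat) (c : Nat → Int) (p : Nat → Bool)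
    (h : ∀ k ∈ l, p k = false → c k = 0) :
    (l.map c).sum = ((l.filter p).map c).sum := by
  induction l with
  | nil => simp
  | cons x t ih =>
    have iht := ih (fun k hk => h k (List.mem_cons_of_mem _ hk))
    by_cases hp : p x
    · rw [List.filter_cons_of_pos hp]
      simp only [List.map_cons, List.sum_cons, iht]
    · rw [List.filter_cons_of_neg (by simp [hp])]
      simp only [List.map_cons, List.sum_cons, iht, h x (by simp) (by simp [hp])]
      omega

-- each summand at least 1 bounds the sum below by the length
lemma pv_len_le_sum (l : List Nat) (c : Nat → Int) (h : ∀ k ∈ l, 1 ≤ c k) :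
    (l.length : Int) ≤ (l.map c).sum := by
  induction l with
  | nil => simp
  | cons x t ih =>
    have := h x (by simp)
    have := ih (fun k hk => h k (List.mem_cons_of_mem _ hk))
    simp only [List.map_cons, List.sum_cons, List.length_cons]
    push_cast
    omega

-- B's outward walk returns 1 exactly when the remaining total cost makes the sum 1
lemma pv_walk_iff (rows : List String) (m : Int) (hm1 : 1 ≤ m) (hm2 : m < (rows.length : Int)) :
    ∀ (cnt k : Nat) (t : Int),
      (k : Int) + (cnt : Int) = min m ((rows.length : Int) - m) → 0 ≤ t →
      (pvWalk rows (rows.length : Int) (m - 1 - (k : Int)) (m + (k : Int)) t = 1 ↔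
        t + ((List.range' k cnt).map
          (fun (k' : Nat) => pvSmudgeCost (PySem.List.pyGetD rows (m - 1 - (k' : Int)) "")
                                  (PySem.List.pyGetD rows (m + (k' : Int)) ""))).sum = 1) := by
  intro cnt
  induction cnt with
  | zero =>
    intro k t hk ht
    rw [pvWalk, dif_neg (by omega)]
    simp
  | succ cnt ih =>
    intro k t hk ht
    have hkD : (k : Int) < min m ((rows.length : Int) - m) := by push_cast at hk ⊢; omega
    set ck := pvSmudgeCost (PySem.List.pyGetD rows (m - 1 - (k : Int)) "")
        (PySem.List.pyGetD rows (m + (k : Int)) "") with hck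
    have hc0 : 0 ≤ ck := pv_cost_nonneg _ _
    have hz : pvWalk rows (rows.length : Int) (m - 1 - (k : Int)) (m + (k : Int)) t
        = (if 1 < t + ck then t + ck
           else pvWalk rows (rows.length : Int) (m - 1 - (k : Int) - 1) (m + (k : Int) + 1) (t + ck)) := by
      rw [pvWalk, dif_pos (by omega)]
    rw [hz, List.range'_succ, List.map_cons, List.sum_cons, ← hck]
    set rest := ((List.range' (k + 1) cnt).map
      (fun (k' : Nat) => pvSmudgeCost (PySem.List.pyGetD rows (m - 1 - (k' : Int)) "")
                              (PySem.List.pyGetD rows (m + (k' : Int)) ""))).sum with hrest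
    have hrest0 : 0 ≤ rest := by
      rw [hrest]
      exact pv_sum_nonneg _ _ (fun k' _ => pv_cost_nonneg _ _)
    by_cases h1 : 1 < t + ck
    · rw [if_pos h1]
      constructor
      · intro h; omega
      · intro h; omega
    · rw [if_neg h1]
      have harith1 : m - 1 - (k : Int) - 1 = m - 1 - ((k + 1 : Nat) : Int) := by push_cast; ring
      have harith2 : m + (k : Int) + 1 = m + ((k + 1 : Nat) : Int) := by push_cast; ring
      rw [harith1, harith2]
      rw [ih (k + 1) (t + ck) (by push_cast at hk ⊢; omega) (by omega)]
      constructor <;> (intro h; omega)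

-- the two loops agree step by step
lemma pv_go_eq (rows : List String) (ms : List Int)
    (hms : ∀ m ∈ ms, 1 ≤ m ∧ m < (rows.length : Int)) :
    pvGoA rows ms = pvGoBAlt rows (rows.length : Int) ms := by
  induction ms with
  | nil => rfl
  | cons m rest ih =>
    obtain ⟨hm1, hm2⟩ := hms m (by simp)
    have ihr := ih (fun x hx => hms x (List.mem_cons_of_mem _ hx))
    simp only [pvGoA, pvGoBAlt]
    rw [pv_to_left rows m hm1 hm2, pv_to_right rows m hm1 hm2, pv_smi _ _ "", List.zip_map']
    simp only [List.length_map, List.length_range]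
    rw [List.filter_congr
      (q := fun k => rows.getD (m.toNat - 1 - k) "" != rows.getD (m.toNat + k) "")
      (by
        intro k hk
        rw [List.mem_range] at hk
        rw [PySem.List.getD_map_range _ _ _ _ hk, PySem.List.getD_map_range _ _ _ _ hk])]
    -- B's walk condition as a statement about the total cost over the full range
    have hwalk := pv_walk_iff rows m hm1 hm2 (min m ((rows.length : Int) - m)).toNat 0 0
      (by push_cast; omega) (by omega)
    simp only [Nat.cast_zero, sub_zero, add_zero, zero_add, ← List.range_eq_range'] at hwalk
    -- the summand agrees with the getD form on in-range indices
    have hmapc : (List.range (min m ((rows.length : Int) - m)).toNat).map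
        (fun (k' : Nat) => pvSmudgeCost (PySem.List.pyGetD rows (m - 1 - (k' : Int)) "")
                                (PySem.List.pyGetD rows (m + (k' : Int)) ""))
        = (List.range (min m ((rows.length : Int) - m)).toNat).map
        (fun k => pvSmudgeCost (rows.getD (m.toNat - 1 - k) "") (rows.getD (m.toNat + k) "")) := by
      refine List.map_congr_left ?_
      intro k hk
      rw [List.mem_range] at hk
      rw [(pv_fetch rows m hm1 hm2 k hk).1, (pv_fetch rows m hm1 hm2 k hk).2]
    rw [hmapc] at hwalk
    set ks := (List.range (min m ((rows.length : Int) - m)).toNat).filter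
        (fun k => rows.getD (m.toNat - 1 - k) "" != rows.getD (m.toNat + k) "") with hksdef
    have hsumf : ((List.range (min m ((rows.length : Int) - m)).toNat).map
        (fun k => pvSmudgeCost (rows.getD (m.toNat - 1 - k) "") (rows.getD (m.toNat + k) ""))).sum
        = (ks.map (fun k => pvSmudgeCost (rows.getD (m.toNat - 1 - k) "") (rows.getD (m.toNat + k) ""))).sum := by
      rw [hksdef]
      refine pv_sum_filter _ _ _ ?_
      intro k _ hp
      have heq : rows.getD (m.toNat - 1 - k) "" = rows.getD (m.toNat + k) "" := by
        simpa [bne_eq_false_iff_eq] using hp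
      simp only [pvSmudgeCost, if_pos heq]
    rw [hsumf] at hwalk
    by_cases hks : ks.length = 1
    · obtain ⟨k0, hk0⟩ := List.length_eq_one_iff.mp hks
      have hk0mem : k0 ∈ ks := by rw [hk0]; simp
      have hk0lt : k0 < (min m ((rows.length : Int) - m)).toNat := by
        rw [hksdef] at hk0mem
        simpa [List.mem_range] using (List.mem_filter.mp hk0mem).1
      have hk0ne : rows.getD (m.toNat - 1 - k0) "" ≠ rows.getD (m.toNat + k0) "" := by
        have := (List.mem_filter.mp (hksdef ▸ hk0mem)).2
        simpa [bne_iff_ne] using this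
      rw [hk0] at hwalk
      simp only [List.map_cons, List.map_nil, List.sum_cons, List.sum_nil, add_zero] at hwalk
      rw [if_pos hks, hk0]
      simp only [List.headD_cons]
      have hA1 : PySem.List.pyGetD ((List.range (min m ((rows.length : Int) - m)).toNat).map
          (fun k => rows.getD (m.toNat - 1 - k) "")) ((k0 : Int)) ""
          = rows.getD (m.toNat - 1 - k0) "" := by
        rw [PySem.List.pyGetD_natCast]
        exact PySem.List.getD_map_range _ _ _ _ hk0lt
      have hA2 : PySem.List.pyGetD ((List.range (min m ((rows.length : Int) - m)).toNat).map
          (fun k => rows.getD (m.toNat + k) "")) ((k0 : Int)) ""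
          = rows.getD (m.toNat + k0) "" := by
        rw [PySem.List.pyGetD_natCast]
        exact PySem.List.getD_map_range _ _ _ _ hk0lt
      rw [hA1, hA2, pv_smi _ _ ' ']
      -- both programs' one-cell check counts the same mismatched character positions
      set ksc := (List.range ((rows.getD (m.toNat - 1 - k0) "").toList.zip
          ((rows.getD (m.toNat + k0) "").toList)).length).filter
          (fun k => (rows.getD (m.toNat - 1 - k0) "").toList.getD k ' '
            != (rows.getD (m.toNat + k0) "").toList.getD k ' ') with hkscdef
      have hcost : pvSmudgeCost (rows.getD (m.toNat - 1 - k0) "") (rows.getD (m.toNat + k0) "")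
          = if ((ksc.length : Nat) : Int) = 1 then 1 else 2 := by
        simp only [pvSmudgeCost, if_neg hk0ne]
        rw [PySem.List.foldl_ite_add_one (p := fun p : Char × Char => p.1 ≠ p.2)]
        rw [pv_char_count _ _ ' ', ← hkscdef]
        norm_num
      rw [hcost] at hwalk
      by_cases hcc : ksc.length = 1
      · rw [if_pos hcc]
        rw [if_pos (hwalk.mpr (by rw [if_pos (by exact_mod_cast hcc)]))]
      · rw [if_neg hcc]
        rw [if_neg (by
          intro hw
          have hv := hwalk.mp hw
          rw [if_neg (by exact_mod_cast hcc)] at hv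
          omega)]
        exact ihr
    · rw [if_neg hks]
      have hpos : ∀ k ∈ ks, 1 ≤ pvSmudgeCost (rows.getD (m.toNat - 1 - k) "")
          (rows.getD (m.toNat + k) "") := by
        intro k hk
        refine pv_cost_one_le _ _ ?_
        have := (List.mem_filter.mp (hksdef ▸ hk)).2
        simpa [bne_iff_ne] using this
      have hsum_ne : ¬((ks.map (fun k => pvSmudgeCost (rows.getD (m.toNat - 1 - k) "")
          (rows.getD (m.toNat + k) ""))).sum = 1) := by
        by_cases hnil : ks = []
        · rw [hnil]; simp
        · have hlen2 : 2 ≤ ks.length := by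
            have h0 : ks.length ≠ 0 := fun h => hnil (List.length_eq_zero_iff.mp h)
            omega
          have hle := pv_len_le_sum ks _ hpos
          intro habs
          rw [habs] at hle
          omega
      rw [if_neg (fun hw => hsum_ne (hwalk.mp hw))]
      exact ihr

-- ===== VERDICT (by name: the statement is the Claim_ definition above) =====
theorem get_mirror_index_b_spec : Claim_equal_get_mirror_index_b := by
  intro rows _hdom
  show get_mirror_index_b rows = get_mirror_index_b_alt rows
  unfold get_mirror_index_b get_mirror_index_b_alt
  exact pv_go_eq rows _ (fun m hm => PySem.List.mem_pyRange_one.mp hm |>.imp id id)
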